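-- pv_equiv track=rewrite | github.com/NykylayMaximov/News_Paper | news/templatetags/custom_filters.py | censor_word
-- ===== SOURCE A (Python) =====
-- def censor_word(word):
--     count = 0
--     new_word = ''
--     for i in word:
--         if i.isalpha() and count == 1:
--             new_word += '*'
--         elif i.isalpha():
--             new_word += i
--             count += 1
--         else:
--             new_word += i
--     return new_word
-- ===== SOURCE B (Python) =====
-- def censor_word(word):
--     idx = next((i for i, ch in enumerate(word) if ch.isalpha()), None)
--     if idx is None:
--         return word
--     return word[:idx + 1] + ''.join('*' if ch.isalpha() else ch for ch in word[idx + 1:])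
-- ===== Notes on version B (the rewrite author's own statement) =====
-- stated objective: alternative
-- what changed: Replaces the count-flag single pass with an explicit search for the first alphabetic character's index, then prefix-keep plus a separate masking pass over the remaining suffix.
import Mathlib
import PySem

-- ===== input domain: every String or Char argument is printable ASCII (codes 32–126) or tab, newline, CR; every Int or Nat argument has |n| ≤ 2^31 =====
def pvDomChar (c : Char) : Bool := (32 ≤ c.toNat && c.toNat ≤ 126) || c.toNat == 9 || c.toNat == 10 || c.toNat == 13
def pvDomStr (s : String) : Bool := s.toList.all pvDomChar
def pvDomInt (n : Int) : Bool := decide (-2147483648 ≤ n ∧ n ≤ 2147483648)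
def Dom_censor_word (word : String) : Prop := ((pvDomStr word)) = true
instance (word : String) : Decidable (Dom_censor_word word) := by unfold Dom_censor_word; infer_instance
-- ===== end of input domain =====

-- B finds the first alphabetic character's index explicitly, keeps the prefix through it,
-- and masks alphabetic characters in the suffix in a separate pass (alternative decomposition).


-- ===== PORT A =====
-- fold over the characters with state (count, new_word), exactly A's loop
def censor_word (word : String) : String :=
  let r := word.toList.foldl (fun (st : Int × List Char) i =>
    if PySem.Chars.isalpha i && st.1 == 1 then (st.1, st.2 ++ ['*'])
    else if PySem.Chars.isalpha i then (st.1 + 1, st.2 ++ [i])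
    else (st.1, st.2 ++ [i])) (0, [])
  String.ofList r.2

-- ===== PORT B =====
-- index of the first alphabetic character (B's enumerate/next scan)
def firstAlphaIdx : List Char → Option Nat
  | [] => none
  | c :: cs => if PySem.Chars.isalpha c then some 0 else (firstAlphaIdx cs).map (· + 1)

def censor_word_alt (word : String) : String :=
  match firstAlphaIdx word.toList with
  | none => word
  | some idx =>
      String.ofList (word.toList.take (idx + 1) ++
        (word.toList.drop (idx + 1)).map (fun ch => if PySem.Chars.isalpha ch then '*' else ch))

-- ===== PRECONDITION & SPEC =====
def Spec_censor_word (word : String) (out : String) : Prop := out = censor_word_alt word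
instance (word : String) (out : String) : Decidable (Spec_censor_word word out) := by unfold Spec_censor_word; infer_instance

-- ===== CLAIM (what is proved, stated in full; the proofs are below) =====
def Claim_equal_censor_word : Prop := ∀ (word : String), Dom_censor_word word → Spec_censor_word word (censor_word word)

-- ===== LEMMAS AND PROOFS =====

-- direct recursive characterisation of A's loop: g0 = before the first letter, mask = after it
def pvMask (c : Char) : Char := if PySem.Chars.isalpha c then '*' else c

def pvG0 : List Char → List Char
  | [] => []
  | c :: cs => if PySem.Chars.isalpha c then c :: cs.map pvMask else c :: pvG0 cs

def pvStep (st : Int × List Char) (i : Char) : Int × List Char :=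
  if PySem.Chars.isalpha i && st.1 == 1 then (st.1, st.2 ++ ['*'])
  else if PySem.Chars.isalpha i then (st.1 + 1, st.2 ++ [i])
  else (st.1, st.2 ++ [i])

theorem foldl_one (cs : List Char) (acc : List Char) :
    cs.foldl pvStep (1, acc) = (1, acc ++ cs.map pvMask) := by
  induction cs generalizing acc with
  | nil => simp
  | cons c cs ih =>
    by_cases h : PySem.Chars.isalpha c = true <;>
      simp [pvStep, h, ih, pvMask]

theorem foldl_zero (cs : List Char) (acc : List Char) :
    (cs.foldl pvStep (0, acc)).2 = acc ++ pvG0 cs := by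
  induction cs generalizing acc with
  | nil => simp [pvG0]
  | cons c cs ih =>
    by_cases h : PySem.Chars.isalpha c = true
    · simp [pvStep, h, pvG0, foldl_one]
    · simp [pvStep, h, pvG0, ih]

theorem g0_none (cs : List Char) (h : firstAlphaIdx cs = none) : pvG0 cs = cs := by
  induction cs with
  | nil => rfl
  | cons c cs ih =>
    by_cases hc : PySem.Chars.isalpha c = true
    · simp [firstAlphaIdx, hc] at h
    · simp [firstAlphaIdx, hc] at h
      simp [pvG0, hc, ih h]

theorem g0_some (cs : List Char) (idx : Nat) (h : firstAlphaIdx cs = some idx) :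
    pvG0 cs = cs.take (idx + 1) ++ (cs.drop (idx + 1)).map pvMask := by
  induction cs generalizing idx with
  | nil => simp [firstAlphaIdx] at h
  | cons c cs ih =>
    by_cases hc : PySem.Chars.isalpha c = true
    · simp [firstAlphaIdx, hc] at h
      subst h
      simp [pvG0, hc]
    · simp [firstAlphaIdx, hc, Option.map_eq_some_iff] at h
      obtain ⟨j, hj, rfl⟩ := h
      simp [pvG0, hc, ih j hj]

-- ===== VERDICT (by name: the statement is the Claim_ definition above) =====
theorem censor_word_spec : Claim_equal_censor_word := by
  intro word _
  unfold Spec_censor_word censor_word censor_word_alt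
  have h0 := foldl_zero word.toList []
  cases h : firstAlphaIdx word.toList with
  | none =>
      simp only []
      rw [show (fun (st : Int × List Char) i =>
        if PySem.Chars.isalpha i && st.1 == 1 then (st.1, st.2 ++ ['*'])
        else if PySem.Chars.isalpha i then (st.1 + 1, st.2 ++ [i])
        else (st.1, st.2 ++ [i])) = pvStep from rfl]
      rw [h0, g0_none _ h]
      simp
  | some idx =>
      simp only []
      rw [show (fun (st : Int × List Char) i =>
        if PySem.Chars.isalpha i && st.1 == 1 then (st.1, st.2 ++ ['*'])
        else if PySem.Chars.isalpha i then (st.1 + 1, st.2 ++ [i])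
        else (st.1, st.2 ++ [i])) = pvStep from rfl]
      rw [h0, g0_some _ _ h,
        show pvMask = (fun ch => if PySem.Chars.isalpha ch then '*' else ch) from rfl]
      simp [List.map_drop]
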